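-- pv_equiv track=rewrite | github.com/kenpodragon/SuperTrooper | backend/routes/skills_development.py | _categorise_gap
-- ===== SOURCE A (Python) =====
-- def _categorise_gap(skill_name, user_skills):
--     """Categorise a gap skill relative to user's skills."""
--     sl = skill_name.lower()
--     if sl in user_skills:
--         return "not_showcased"
--     # Check adjacency – user has a skill that shares a root word
--     for us in user_skills:
--         if len(us) > 3 and (us in sl or sl in us):
--             return "adjacent"
--     return "deep_gap"
-- ===== SOURCE B (Python) =====
-- def _categorise_gap(skill_name, user_skills):
--     """Categorise a gap skill: score every user skill, keep the max, look up the label."""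
--     sl = skill_name.lower()
--
--     def score(us):
--         if us == sl:
--             return 2
--         if len(us) > 3 and (us in sl or sl in us):
--             return 1
--         return 0
--
--     best = 0
--     for us in user_skills:
--         best = max(best, score(us))
--     return ("deep_gap", "adjacent", "not_showcased")[best]
-- ===== Notes on version B (the rewrite author's own statement) =====
-- stated objective: alternative
-- what changed: A's membership test plus early-exit adjacency scan are replaced by a max-of-scores reduction: each user skill is scored 2/1/0 (exact/adjacent/unrelated), one fold keeps the maximum, and the label is read from a fixed table indexed by the max.
import Mathlib
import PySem

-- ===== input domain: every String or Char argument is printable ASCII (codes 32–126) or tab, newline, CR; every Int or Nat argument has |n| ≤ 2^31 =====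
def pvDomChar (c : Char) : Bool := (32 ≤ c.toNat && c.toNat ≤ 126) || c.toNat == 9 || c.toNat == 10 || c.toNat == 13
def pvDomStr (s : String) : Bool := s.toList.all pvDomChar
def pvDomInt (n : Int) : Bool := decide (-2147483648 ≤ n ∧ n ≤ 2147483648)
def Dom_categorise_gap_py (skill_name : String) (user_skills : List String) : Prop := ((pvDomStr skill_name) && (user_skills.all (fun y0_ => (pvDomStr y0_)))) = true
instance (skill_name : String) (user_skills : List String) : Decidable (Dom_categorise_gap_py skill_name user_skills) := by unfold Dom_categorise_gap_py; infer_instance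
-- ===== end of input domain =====

-- B replaces A's membership test + early-exit scan by a max-of-scores fold with a label table; same cost, different algorithm shape.

-- ===== PORT A =====
-- the early-exit `for us in user_skills` loop of A
def pvScanA (sl : String) : List String → String
  | [] => "deep_gap"
  | us :: rest =>
      if (decide (3 < PySem.Str.len us)) && (PySem.Str.isIn us sl || PySem.Str.isIn sl us) then
        "adjacent"
      else pvScanA sl rest

def categorise_gap_py (skill_name : String) (user_skills : List String) : String :=
  let sl := PySem.Str.lower skill_name
  if sl ∈ user_skills then "not_showcased"
  else pvScanA sl user_skills

-- ===== PORT B =====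
-- B's `score` helper: 2 = exact, 1 = adjacent, 0 = unrelated
def pvScore (sl us : String) : Nat :=
  if us == sl then 2
  else if (decide (3 < PySem.Str.len us)) && (PySem.Str.isIn us sl || PySem.Str.isIn sl us) then 1
  else 0

-- B's label table `("deep_gap", "adjacent", "not_showcased")[best]`
def pvTable : Nat → String
  | 0 => "deep_gap"
  | 1 => "adjacent"
  | _ => "not_showcased"

def categorise_gap_py_alt (skill_name : String) (user_skills : List String) : String :=
  let sl := PySem.Str.lower skill_name
  let best := user_skills.foldl (fun best us => max best (pvScore sl us)) 0
  pvTable best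

-- ===== PRECONDITION & SPEC =====
def Spec_categorise_gap_py (skill_name : String) (user_skills : List String) (out : String) : Prop := out = categorise_gap_py_alt skill_name user_skills
instance (skill_name : String) (user_skills : List String) (out : String) : Decidable (Spec_categorise_gap_py skill_name user_skills out) := by unfold Spec_categorise_gap_py; infer_instance

-- ===== CLAIM (what is proved, stated in full; the proofs are below) =====
def Claim_equal_categorise_gap_py : Prop := ∀ (skill_name : String) (user_skills : List String), Dom_categorise_gap_py skill_name user_skills → Spec_categorise_gap_py skill_name user_skills (categorise_gap_py skill_name user_skills)

-- ===== LEMMAS AND PROOFS =====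

-- the adjacency test appearing in both ports
def pvAdj (sl us : String) : Bool :=
  (decide (3 < PySem.Str.len us)) && (PySem.Str.isIn us sl || PySem.Str.isIn sl us)

-- the value of the whole max-of-scores reduction, as a case split on the list
def pvG (sl : String) (l : List String) : Nat :=
  if sl ∈ l then 2 else if l.any (pvAdj sl) then 1 else 0

theorem pvScanA_eq (sl : String) (l : List String) :
    pvScanA sl l = (if l.any (pvAdj sl) then "adjacent" else "deep_gap") := by
  induction l with
  | nil => simp [pvScanA]
  | cons us rest ih =>
      have hstep : pvScanA sl (us :: rest) =
          if pvAdj sl us then "adjacent" else pvScanA sl rest := rfl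
      rw [hstep, List.any_cons, ih]
      cases h : pvAdj sl us <;> simp

theorem pvScore_cons (sl us : String) (rest : List String) :
    max (pvScore sl us) (pvG sl rest) = pvG sl (us :: rest) := by
  have hs : pvScore sl us
      = if (us == sl) = true then 2 else if pvAdj sl us = true then 1 else 0 := rfl
  rw [hs]
  unfold pvG
  rw [List.any_cons]
  have hcons : (sl ∈ us :: rest) ↔ ((us == sl) = true ∨ sl ∈ rest) := by
    rw [List.mem_cons, beq_iff_eq, eq_comm]
  simp only [hcons, Bool.or_eq_true]
  split_ifs <;> first | rfl | omega | tauto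

theorem pvFold_eq (sl : String) (l : List String) (b : Nat) :
    l.foldl (fun best us => max best (pvScore sl us)) b = max b (pvG sl l) := by
  induction l generalizing b with
  | nil => simp [pvG]
  | cons us rest ih =>
      rw [List.foldl_cons, ih, Nat.max_assoc, pvScore_cons]

-- ===== VERDICT (by name: the statement is the Claim_ definition above) =====
theorem categorise_gap_py_spec : Claim_equal_categorise_gap_py := by
  intro skill_name user_skills _
  show categorise_gap_py skill_name user_skills = categorise_gap_py_alt skill_name user_skills
  show (if PySem.Str.lower skill_name ∈ user_skills then "not_showcased"
        else pvScanA (PySem.Str.lower skill_name) user_skills)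
      = pvTable (user_skills.foldl (fun best us => max best (pvScore (PySem.Str.lower skill_name) us)) 0)
  rw [pvFold_eq, Nat.max_comm, Nat.max_eq_left (Nat.zero_le _), pvScanA_eq]
  set sl := PySem.Str.lower skill_name
  by_cases hmem : sl ∈ user_skills
  · rw [if_pos hmem, pvG, if_pos hmem]; rfl
  · rw [if_neg hmem, pvG, if_neg hmem]
    by_cases hadj : user_skills.any (pvAdj sl) = true
    · rw [if_pos hadj, if_pos hadj]; rfl
    · rw [if_neg hadj, if_neg hadj]; rfl
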